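-- pv_equiv track=rewrite | github.com/arin17bishwa/myCP_sols | CC/REC09B.py | func
-- ===== SOURCE A (Python) =====
-- def cart(a, b):
--     return a * a + b * b
--
-- def func(a, b):
--     c = d = 2000
--     m1 = 9000000
--     m2 = 4000
--     for i in range(2000):
--         for j in range(i, 2000):
--             if cart(a, b) < cart(i, j) <= m1:
--                 if cart(i, j) == m1 and i + j < m2:
--                     c, d = i, j
--                 elif cart(i, j) < m1:
--                     c, d = i, j
--                     m1 = cart(c, d)
--                     m2 = c + d
--     return c, d
-- ===== SOURCE B (Python) =====
-- def func(a, b):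
--     # For each i, binary-search the smallest j in [i, 2000) with i*i+j*j > a*a+b*b,
--     # then keep the first (smallest-i) candidate with minimal i*i+j*j.
--     t = a * a + b * b
--     c, d = 2000, 2000
--     best = None
--     for i in range(2000):
--         lo, hi = i, 2000
--         while lo < hi:
--             mid = (lo + hi) // 2
--             if t < i * i + mid * mid:
--                 hi = mid
--             else:
--                 lo = mid + 1
--         if lo < 2000:
--             s = i * i + lo * lo
--             if best is None or s < best:
--                 best = s
--                 c, d = i, lo
--     return c, d
-- ===== Notes on version B (the rewrite author's own statement) =====
-- stated objective: faster
-- what changed: Replaces the quadratic scan over all grid pairs by a per-i binary search for the smallest qualifying j, keeping the first candidate with minimal i*i+j*j (the tie-break branch of A is provably dead).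
import Mathlib
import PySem

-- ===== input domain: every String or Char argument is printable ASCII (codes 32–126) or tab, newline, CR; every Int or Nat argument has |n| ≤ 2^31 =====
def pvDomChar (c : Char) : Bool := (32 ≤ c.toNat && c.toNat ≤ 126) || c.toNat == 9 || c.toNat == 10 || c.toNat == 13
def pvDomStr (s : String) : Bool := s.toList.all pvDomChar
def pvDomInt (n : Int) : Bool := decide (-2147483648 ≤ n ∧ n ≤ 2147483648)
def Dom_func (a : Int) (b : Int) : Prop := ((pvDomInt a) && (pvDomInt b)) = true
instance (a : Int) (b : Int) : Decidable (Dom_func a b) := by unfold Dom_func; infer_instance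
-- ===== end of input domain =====

-- B replaces A's quadratic scan over all grid pairs by a per-i binary search for the
-- smallest qualifying j (objective: faster, O(n log n) vs O(n^2) over the fixed grid).

-- ===== PORT A =====
def cart (a : Int) (b : Int) : Int := a * a + b * b

-- body of A's inner loop, for fixed a b i; state (c, d, m1, m2)
def stepAj (a : Int) (b : Int) (i : Int) (st : Int × Int × Int × Int) (j : Int) :
    Int × Int × Int × Int :=
  if cart a b < cart i j ∧ cart i j ≤ st.2.2.1 then
    if cart i j = st.2.2.1 ∧ i + j < st.2.2.2 then (i, j, st.2.2.1, st.2.2.2)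
    else if cart i j < st.2.2.1 then (i, j, cart i j, i + j)
    else st
  else st

def func (a : Int) (b : Int) : Int × Int :=
  let st := (PySem.List.pyRange 0 2000 1).foldl
    (fun st i => (PySem.List.pyRange i 2000 1).foldl (stepAj a b i) st)
    (2000, 2000, 9000000, 4000)
  (st.1, st.2.1)

-- ===== PORT B =====
-- B's while-loop: smallest j in [lo, hi) with t < i*i + j*j, or hi if none
def bsearch (t : Int) (i : Int) (lo : Int) (hi : Int) : Int :=
  if h : lo < hi then
    let mid := PySem.Int.floordiv (lo + hi) 2
    if t < i * i + mid * mid then bsearch t i lo mid else bsearch t i (mid + 1) hi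
  else lo
termination_by (hi - lo).toNat
decreasing_by
  · have h2 : PySem.Int.floordiv (lo + hi) 2 < hi := by
      rw [PySem.Int.floordiv_lt_iff_lt_mul (by norm_num)]; omega
    omega
  · have h1 := (PySem.Int.floordiv_two_mid_bounds (le_of_lt h)).1
    omega

-- body of B's outer loop; state (c, d, best)
def stepB (t : Int) (st : Int × Int × Option Int) (i : Int) : Int × Int × Option Int :=
  let j := bsearch t i i 2000
  if j < 2000 then
    let s := i * i + j * j
    match st.2.2 with
    | none => (i, j, some s)
    | some m => if s < m then (i, j, some s) else st
  else st

def func_alt (a : Int) (b : Int) : Int × Int :=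
  let t := a * a + b * b
  let st := (PySem.List.pyRange 0 2000 1).foldl (stepB t) (2000, 2000, none)
  (st.1, st.2.1)

-- ===== PRECONDITION & SPEC =====
def Spec_func (a : Int) (b : Int) (out : Int × Int) : Prop := out = func_alt a b
instance (a : Int) (b : Int) (out : Int × Int) : Decidable (Spec_func a b out) := by unfold Spec_func; infer_instance

-- ===== CLAIM (what is proved, stated in full; the proofs are below) =====
def Claim_equal_func : Prop := ∀ (a : Int) (b : Int), Dom_func a b → Spec_func a b (func a b)

-- ===== LEMMAS AND PROOFS =====

-- binary-search specification
theorem bsearch_spec (t i : Int) : ∀ n (lo hi : Int), (hi - lo).toNat = n → 0 ≤ lo → lo ≤ hi →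
    lo ≤ bsearch t i lo hi ∧ bsearch t i lo hi ≤ hi ∧
    (∀ k, lo ≤ k → k < bsearch t i lo hi → ¬ t < i * i + k * k) ∧
    (bsearch t i lo hi < hi → t < i * i + bsearch t i lo hi * bsearch t i lo hi) := by
  intro n
  induction n using Nat.strong_induction_on with
  | _ n ih =>
    intro lo hi hn h0 hlh
    rw [bsearch]
    by_cases h : lo < hi
    · simp only [h, dif_pos]
      have hm1 := (PySem.Int.floordiv_two_mid_bounds (le_of_lt h)).1
      have hm2 : PySem.Int.floordiv (lo + hi) 2 < hi := by
        rw [PySem.Int.floordiv_lt_iff_lt_mul (by norm_num)]; omega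
      set mid := PySem.Int.floordiv (lo + hi) 2 with hmid
      by_cases hp : t < i * i + mid * mid
      · simp only [hp, if_pos]
        obtain ⟨s1, s2, s3, s4⟩ := ih (hi := mid) (lo := lo) ((mid - lo).toNat)
          (by omega) rfl h0 hm1
        refine ⟨s1, by omega, s3, ?_⟩
        intro hlt
        rcases lt_or_eq_of_le s2 with hlt2 | heq
        · exact s4 hlt2
        · rw [heq]; exact hp
      · simp only [hp, if_neg, not_false_iff]
        obtain ⟨s1, s2, s3, s4⟩ := ih (hi := hi) (lo := mid + 1) ((hi - (mid + 1)).toNat)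
          (by omega) rfl (by omega) (by omega)
        refine ⟨by omega, s2, ?_, s4⟩
        intro k hk1 hk2 hP
        by_cases hk3 : mid + 1 ≤ k
        · exact s3 k hk3 hk2 hP
        · -- k ≤ mid, 0 ≤ k : i*i + k*k ≤ i*i + mid*mid ≤ t
          have hkm : k ≤ mid := by omega
          have : k * k ≤ mid * mid := by nlinarith
          exact hp (by nlinarith)
    · simp only [h, dif_neg, not_false_iff]
      exact ⟨le_refl _, hlh, fun k hk1 hk2 _ => by omega, fun hlt => hlt.elim⟩

-- bsearch on [lo,2000) from a failing lo equals bsearch from lo+1 (both are the least hit)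
theorem bsearch_shift (t i lo : Int) (h0 : 0 ≤ lo) (hlt : lo < 2000)
    (hP : ¬ t < i * i + lo * lo) :
    bsearch t i lo 2000 = bsearch t i (lo + 1) 2000 := by
  obtain ⟨a1, a2, a3, a4⟩ := bsearch_spec t i _ lo 2000 rfl h0 (by omega)
  obtain ⟨b1, b2, b3, b4⟩ := bsearch_spec t i _ (lo + 1) 2000 rfl (by omega) (by omega)
  by_contra hne
  rcases lt_or_gt_of_ne hne with hlt2 | hgt
  · -- bs lo < bs (lo+1) ≤ 2000, so bs lo < 2000, P (bs lo); but bs lo ≥ lo,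
    -- and if bs lo = lo then ¬P lo, else b3 kills it
    have hPv := a4 (by omega)
    rcases eq_or_lt_of_le a1 with heq | hgt2
    · exact hP (heq ▸ hPv)
    · exact b3 _ (by omega) hlt2 hPv
  · have hPv := b4 (by omega)
    exact a3 _ (by omega) hgt hPv

-- if m1 < cart i lo and the whole j-range is ≥ lo, A's inner fold does nothing
theorem skipAll (a b i : Int) : ∀ n (lo : Int), (2000 - lo).toNat = n → 0 ≤ lo →
    ∀ st : Int × Int × Int × Int, st.2.2.1 < i * i + lo * lo →
    (PySem.List.pyRange lo 2000 1).foldl (stepAj a b i) st = st := by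
  intro n
  induction n with
  | zero =>
    intro lo hn h0 st hm
    have : (2000 : Int) ≤ lo := by omega
    simp [PySem.List.pyRange_one, (by omega : ((2000 : Int) - lo).toNat = 0)]
  | succ n ih =>
    intro lo hn h0 st hm
    have hlt : lo < 2000 := by omega
    rw [PySem.List.pyRange_one_cons hlt, List.foldl_cons]
    have hstep : stepAj a b i st lo = st := by
      unfold stepAj
      have : ¬ (cart a b < cart i lo ∧ cart i lo ≤ st.2.2.1) := by
        unfold cart; intro ⟨_, h2⟩; omega
      simp [this]
    rw [hstep]
    exact ih (lo + 1) (by omega) (by omega) st (by nlinarith)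

-- A's inner loop over j ∈ [lo, 2000) equals one candidate step at the least qualifying j
theorem innerA_eq (a b i : Int) (h0 : 0 ≤ i) : ∀ n (lo : Int), (2000 - lo).toNat = n →
    i ≤ lo → ∀ st : Int × Int × Int × Int,
    (PySem.List.pyRange lo 2000 1).foldl (stepAj a b i) st =
      (if bsearch (cart a b) i lo 2000 < 2000
       then stepAj a b i st (bsearch (cart a b) i lo 2000) else st) := by
  intro n
  induction n with
  | zero =>
    intro lo hn hil st
    have h2000 : (2000 : Int) ≤ lo := by omega
    have hbs : bsearch (cart a b) i lo 2000 = lo := by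
      rw [bsearch]; simp [show ¬ lo < (2000 : Int) by omega]
    have : ¬ bsearch (cart a b) i lo 2000 < 2000 := by omega
    simp [PySem.List.pyRange_one, (by omega : ((2000 : Int) - lo).toNat = 0), this]
  | succ n ih =>
    intro lo hn hil st
    have hlt : lo < 2000 := by omega
    rw [PySem.List.pyRange_one_cons hlt, List.foldl_cons]
    by_cases hP : cart a b < cart i lo
    · -- lo qualifies: bsearch returns lo, step fires here, rest is skipped
      have hbs : bsearch (cart a b) i lo 2000 = lo := by
        obtain ⟨a1, a2, a3, a4⟩ := bsearch_spec (cart a b) i _ lo 2000 rfl (by omega) (by omega)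
        by_contra hne
        have hgt : lo < bsearch (cart a b) i lo 2000 := lt_of_le_of_ne a1 (Ne.symm hne)
        exact a3 lo (le_refl _) hgt (by unfold cart at hP ⊢; omega)
      rw [hbs]
      simp only [hlt, if_pos]
      have hm : (stepAj a b i st lo).2.2.1 ≤ cart i lo := by
        unfold stepAj
        split_ifs with h1 h2 h3
        · exact h2.1.ge
        · exact le_refl _
        · omega
        · omega
      refine skipAll a b i _ (lo + 1) rfl (by omega) _ ?_
      have hc : cart i lo = i * i + lo * lo := rfl
      nlinarith [hm, hc ▸ hm]
    · -- lo does not qualify: step is a no-op, recurse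
      have hstep : stepAj a b i st lo = st := by
        unfold stepAj
        simp [hP]
      rw [hstep, ih (lo + 1) (by omega) (by omega) st,
        bsearch_shift (cart a b) i lo (by omega) hlt (by unfold cart at hP ⊢; omega)]

-- on the circle c*c+d*d = i*i+j*j with 0 ≤ c < i ≤ j and c ≤ d, the sum grows
theorem geom (c d i j : Int) (h0 : 0 ≤ c) (hci : c < i) (hij : i ≤ j)
    (he : c * c + d * d = i * i + j * j) (hd : 0 ≤ d) : c + d ≤ i + j := by
  have hdj : j < d := by nlinarith
  nlinarith [mul_lt_mul_of_pos_left (show i + c < d + j by omega) (show (0:Int) < i - c by omega)]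

-- the simulation relation between A's state and B's state after processing i < lo
def SimRel (t lo : Int) (sa : Int × Int × Int × Int) (sb : Int × Int × Option Int) : Prop :=
  (sa = (2000, 2000, 9000000, 4000) ∧ sb = (2000, 2000, none))
  ∨ (∃ c d, 0 ≤ c ∧ c ≤ d ∧ d ≤ 1999 ∧ c < lo ∧ t < c * c + d * d ∧
      sa = (c, d, c * c + d * d, c + d) ∧ sb = (c, d, some (c * c + d * d)))

-- one outer step preserves SimRel
theorem step_rel (a b lo : Int) (h0 : 0 ≤ lo) (hlt : lo < 2000)
    (sa : Int × Int × Int × Int) (sb : Int × Int × Option Int)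
    (hr : SimRel (cart a b) lo sa sb) :
    SimRel (cart a b) (lo + 1)
      ((PySem.List.pyRange lo 2000 1).foldl (stepAj a b lo) sa)
      (stepB (cart a b) sb lo) := by
  rw [innerA_eq a b lo h0 _ lo rfl (le_refl _) sa]
  obtain ⟨b1, b2, b3, b4⟩ := bsearch_spec (cart a b) lo _ lo 2000 rfl h0 (by omega)
  set j := bsearch (cart a b) lo lo 2000 with hj
  by_cases hjlt : j < 2000
  · have hPj : cart a b < lo * lo + j * j := b4 hjlt
    simp only [hjlt, if_pos]
    unfold stepB
    rw [← hj]
    simp only [hjlt, if_pos]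
    rcases hr with ⟨hsa, hsb⟩ | ⟨c, d, hc0, hcd, hd, hclo, ht, hsa, hsb⟩
    · -- first candidate ever
      subst hsa; subst hsb
      unfold stepAj cart
      have hcond : a * a + b * b < lo * lo + j * j ∧ lo * lo + j * j ≤ (9000000 : Int) := by
        constructor
        · exact hPj
        · nlinarith [b1, b2]
      have hne : ¬ (lo * lo + j * j = (9000000 : Int) ∧ lo + j < 4000) := by
        intro ⟨h1, _⟩; nlinarith [b1, b2]
      have hlt9 : lo * lo + j * j < (9000000 : Int) := by nlinarith [b1, b2]
      simp only [hcond, and_self, if_pos, hne, if_neg, hlt9, if_pos, not_false_iff]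
      right
      exact ⟨lo, j, h0, b1, by omega, by omega, hPj, rfl, rfl⟩
    · subst hsa; subst hsb
      simp only
      rcases lt_trichotomy (lo * lo + j * j) (c * c + d * d) with hlt2 | heq | hgt
      · -- strictly better: both update
        have hA : stepAj a b lo (c, d, c * c + d * d, c + d) j = (lo, j, cart lo j, lo + j) := by
          unfold stepAj cart
          have h1 : a * a + b * b < lo * lo + j * j ∧ lo * lo + j * j ≤ c * c + d * d := by
            exact ⟨hPj, by omega⟩
          have h2 : ¬ (lo * lo + j * j = c * c + d * d ∧ lo + j < c + d) := by
            intro ⟨hh, _⟩; omega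
          simp [h1, h2, hlt2]
        rw [hA]
        simp only [hlt2, if_pos]
        right
        exact ⟨lo, j, by omega, b1, by omega, by omega, hPj, rfl, rfl⟩
      · -- tie: A's tie-break branch is dead (sum can only grow), neither updates
        have hsum : c + d ≤ lo + j := geom c d lo j hc0 hclo b1 heq.symm (by omega)
        have hA : stepAj a b lo (c, d, c * c + d * d, c + d) j = (c, d, c * c + d * d, c + d) := by
          unfold stepAj cart
          have h2 : ¬ (lo * lo + j * j = c * c + d * d ∧ lo + j < c + d) := by
            intro ⟨_, hh⟩; omega
          have h3 : ¬ lo * lo + j * j < c * c + d * d := by omega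
          simp [h2, h3]
        rw [hA]
        have : ¬ lo * lo + j * j < c * c + d * d := by omega
        simp only [this, if_neg, not_false_iff]
        right
        exact ⟨c, d, hc0, hcd, hd, by omega, ht, rfl, rfl⟩
      · -- worse: neither updates
        have hA : stepAj a b lo (c, d, c * c + d * d, c + d) j = (c, d, c * c + d * d, c + d) := by
          unfold stepAj cart
          have h1 : ¬ (a * a + b * b < lo * lo + j * j ∧ lo * lo + j * j ≤ c * c + d * d) := by
            intro ⟨_, hh⟩; omega
          simp [h1]
        rw [hA]
        have : ¬ lo * lo + j * j < c * c + d * d := by omega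
        simp only [this, if_neg, not_false_iff]
        right
        exact ⟨c, d, hc0, hcd, hd, by omega, ht, rfl, rfl⟩
  · -- no candidate for this i: both skip
    simp only [hjlt, if_neg, not_false_iff]
    unfold stepB
    rw [← hj]
    simp only [hjlt, if_neg, not_false_iff]
    rcases hr with ⟨hsa, hsb⟩ | ⟨c, d, hc0, hcd, hd, hclo, ht, hsa, hsb⟩
    · exact Or.inl ⟨hsa, hsb⟩
    · exact Or.inr ⟨c, d, hc0, hcd, hd, by omega, ht, hsa, hsb⟩

-- the two outer folds stay related
theorem outer_rel (a b : Int) : ∀ n (lo : Int), (2000 - lo).toNat = n → 0 ≤ lo →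
    ∀ sa sb, SimRel (cart a b) lo sa sb →
    SimRel (cart a b) 2000
      ((PySem.List.pyRange lo 2000 1).foldl
        (fun st i => (PySem.List.pyRange i 2000 1).foldl (stepAj a b i) st) sa)
      ((PySem.List.pyRange lo 2000 1).foldl (stepB (cart a b)) sb) := by
  intro n
  induction n with
  | zero =>
    intro lo hn h0 sa sb hr
    rw [show PySem.List.pyRange lo 2000 1 = [] by
      simp [PySem.List.pyRange_one, (by omega : ((2000 : Int) - lo).toNat = 0)]]
    simp only [List.foldl_nil]
    rcases hr with ⟨hsa, hsb⟩ | ⟨c, d, hc0, hcd, hd, _, ht, hsa, hsb⟩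
    · exact Or.inl ⟨hsa, hsb⟩
    · exact Or.inr ⟨c, d, hc0, hcd, hd, by omega, ht, hsa, hsb⟩
  | succ n ih =>
    intro lo hn h0 sa sb hr
    have hlt : lo < 2000 := by omega
    rw [PySem.List.pyRange_one_cons hlt, List.foldl_cons, List.foldl_cons]
    exact ih (lo + 1) (by omega) (by omega) _ _ (step_rel a b lo h0 hlt sa sb hr)

-- ===== VERDICT (by name: the statement is the Claim_ definition above) =====
theorem func_spec : Claim_equal_func := by
  intro a b _
  unfold Spec_func func func_alt
  have h := outer_rel a b _ 0 rfl (by omega) (2000, 2000, 9000000, 4000) (2000, 2000, none)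
    (Or.inl ⟨rfl, rfl⟩)
  have hc : cart a b = a * a + b * b := rfl
  rw [hc] at h
  rcases h with ⟨hsa, hsb⟩ | ⟨c, d, _, _, _, _, _, hsa, hsb⟩ <;> simp only [hsa, hsb]
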